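-- pv_equiv track=rewrite | github.com/almostanonymousdev/ghost-in-m-sheet | tools/check_link_macros.py | has_unevaluated_macro
-- ===== SOURCE A (Python) =====
-- def has_unevaluated_macro(text):
--     """Return True if ``text`` contains ``<<...>>`` macro syntax outside
--     of any backtick segment.
--
--     A backtick-wrapped span is a TwineScript expression — anything
--     inside is fine. Only ``<<`` occurrences outside backtick segments
--     count as bugs.
--     """
--     if text is None:
--         return False
--     in_backtick = False
--     i = 0
--     n = len(text)
--     while i < n:
--         ch = text[i]
--         if ch == '`':
--             in_backtick = not in_backtick
--             i += 1
--             continue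
--         if not in_backtick and i + 1 < n and ch == '<' and text[i + 1] == '<':
--             return True
--         i += 1
--     return False
-- ===== SOURCE B (Python) =====
-- def has_unevaluated_macro(text):
--     if text is None:
--         return False
--     parts = text.split('`')
--     return any(i % 2 == 0 and '<<' in part for i, part in enumerate(parts))
-- ===== Notes on version B (the rewrite author's own statement) =====
-- stated objective: simpler
-- what changed: Replaced the char-by-char in_backtick state-machine scan with text.split('`') followed by a '<<' substring check on the even-indexed segments (the spans outside backticks).
import Mathlib
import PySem

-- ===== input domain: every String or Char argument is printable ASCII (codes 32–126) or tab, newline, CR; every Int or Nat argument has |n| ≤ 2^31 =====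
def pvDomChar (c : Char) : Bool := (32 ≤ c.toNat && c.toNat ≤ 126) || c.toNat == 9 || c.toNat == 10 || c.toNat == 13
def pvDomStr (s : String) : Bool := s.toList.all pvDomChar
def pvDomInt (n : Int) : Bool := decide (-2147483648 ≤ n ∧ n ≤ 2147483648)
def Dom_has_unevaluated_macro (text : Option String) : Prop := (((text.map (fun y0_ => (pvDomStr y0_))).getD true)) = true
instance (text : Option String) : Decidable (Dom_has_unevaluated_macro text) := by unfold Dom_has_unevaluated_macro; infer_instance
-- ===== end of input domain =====

-- B replaces A's char-by-char backtick state machine by split-on-backtick + a '<<' check on the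
-- even-indexed segments (the spans outside backticks): a simpler decomposition, same result.


-- ===== PORT A =====
-- the while-loop with its in_backtick flag, as structural recursion over the characters;
-- 'rest.head? == some '<'' is exactly "i + 1 < n and text[i+1] == '<'"
def pvScanA : Bool → List Char → Bool
  | _, [] => false
  | inB, c :: rest =>
    if c = '`' then pvScanA (!inB) rest
    else if !inB && c == '<' && rest.head? == some '<' then true
    else pvScanA inB rest

def has_unevaluated_macro (text : Option String) : Bool :=
  match text with
  | none => false
  | some t => pvScanA false t.toList

-- ===== PORT B =====
-- text.split('`') (sep ≠ "" so splitOn is the exact form), then any('<<' in part) on even indices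
def has_unevaluated_macro_alt (text : Option String) : Bool :=
  match text with
  | none => false
  | some t =>
    let parts := PySem.Chars.splitOn t.toList ['`']
    (PySem.List.enumerate parts).any
      (fun ip => (PySem.Int.mod ip.1 2 == 0) && PySem.Chars.isIn ['<', '<'] ip.2)

-- ===== PRECONDITION & SPEC =====
def Spec_has_unevaluated_macro (text : Option String) (out : Bool) : Prop := out = has_unevaluated_macro_alt text
instance (text : Option String) (out : Bool) : Decidable (Spec_has_unevaluated_macro text out) := by unfold Spec_has_unevaluated_macro; infer_instance

-- ===== CLAIM (what is proved, stated in full; the proofs are below) =====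
def Claim_equal_has_unevaluated_macro : Prop := ∀ (text : Option String), Dom_has_unevaluated_macro text → Spec_has_unevaluated_macro text (has_unevaluated_macro text)

-- ===== LEMMAS AND PROOFS =====

-- split on '`' as (first segment, remaining segments)
def pvSplit : List Char → List Char × List (List Char)
  | [] => ([], [])
  | c :: rest =>
    if c = '`' then ([], (pvSplit rest).1 :: (pvSplit rest).2)
    else (c :: (pvSplit rest).1, (pvSplit rest).2)

-- does any segment at an "even" position (relative to the flag) contain '<<'?
def pvAltAny : Bool → List (List Char) → Bool
  | _, [] => false
  | even, p :: ps => (even && PySem.Chars.isIn ['<', '<'] p) || pvAltAny (!even) ps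

lemma pvGo_spec (fuel : Nat) (l cur : List Char) (acc : List (List Char))
    (h : l.length < fuel) :
    PySem.Chars.splitOn.go ['`'] fuel l cur acc =
      acc.reverse ++ (cur.reverse ++ (pvSplit l).1) :: (pvSplit l).2 := by
  induction fuel generalizing l cur acc with
  | zero => omega
  | succ fuel ih =>
    cases l with
    | nil => simp [PySem.Chars.splitOn.go, pvSplit]
    | cons c rest =>
      by_cases hc : c = '`'
      · subst hc
        rw [show PySem.Chars.splitOn.go ['`'] (fuel+1) ('`' :: rest) cur acc
              = PySem.Chars.splitOn.go ['`'] fuel rest [] (cur.reverse :: acc) from by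
            simp [PySem.Chars.splitOn.go, List.isPrefixOf]]
        rw [ih rest [] (cur.reverse :: acc) (by simpa using Nat.lt_of_succ_lt_succ h)]
        simp [pvSplit]
      · rw [show PySem.Chars.splitOn.go ['`'] (fuel+1) (c :: rest) cur acc
              = PySem.Chars.splitOn.go ['`'] fuel rest (c :: cur) acc from by
            simp [PySem.Chars.splitOn.go, List.isPrefixOf, Ne.symm hc]]
        rw [ih rest (c :: cur) acc (by simpa using Nat.lt_of_succ_lt_succ h)]
        simp [pvSplit, hc]

lemma pvSplitOn_eq (cs : List Char) :
    PySem.Chars.splitOn cs ['`'] = (pvSplit cs).1 :: (pvSplit cs).2 := by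
  rw [show PySem.Chars.splitOn cs ['`'] = PySem.Chars.splitOn.go ['`'] (cs.length + 1) cs [] [] from rfl]
  rw [pvGo_spec (cs.length + 1) cs [] [] (by omega)]
  simp

lemma pvHead_lt_iff : ∀ (p : List Char), ['<'] <+: p ↔ p.head? = some '<' := by
  intro p
  cases p with
  | nil => simp
  | cons d t => simp [List.cons_prefix_cons, eq_comm]

lemma pvHas2_cons (c : Char) (p : List Char) :
    PySem.Chars.isIn ['<', '<'] (c :: p) =
      ((c == '<' && p.head? == some '<') || PySem.Chars.isIn ['<', '<'] p) := by
  rw [Bool.eq_iff_iff]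
  simp only [PySem.Chars.isIn_iff_infix, Bool.or_eq_true, Bool.and_eq_true, beq_iff_eq,
    List.infix_cons_iff, List.cons_prefix_cons]
  constructor
  · rintro (⟨hc, hp⟩ | h)
    · exact Or.inl ⟨hc.symm, (pvHead_lt_iff p).mp hp⟩
    · exact Or.inr h
  · rintro (⟨hc, hp⟩ | h)
    · exact Or.inl ⟨hc.symm, (pvHead_lt_iff p).mpr hp⟩
    · exact Or.inr h

lemma pvSplit_head_lt (rest : List Char) :
    ((pvSplit rest).1.head? == some '<') = (rest.head? == some '<') := by
  cases rest with
  | nil => simp [pvSplit]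
  | cons d t =>
    by_cases hd : d = '`'
    · subst hd; simp [pvSplit]
    · simp [pvSplit, hd]

lemma pvScanA_eq (cs : List Char) (inB : Bool) :
    pvScanA inB cs = pvAltAny (!inB) ((pvSplit cs).1 :: (pvSplit cs).2) := by
  have hnil : PySem.Chars.isIn ['<', '<'] ([] : List Char) = false := by decide
  induction cs generalizing inB with
  | nil => cases inB <;> simp [pvScanA, pvSplit, pvAltAny, hnil]
  | cons c rest ih =>
    by_cases hc : c = '`'
    · subst hc
      rw [show pvScanA inB ('`' :: rest) = pvScanA (!inB) rest from by simp [pvScanA]]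
      rw [ih (!inB)]
      cases inB <;> simp [pvSplit, pvAltAny, hnil]
    · cases inB with
      | true =>
        rw [show pvScanA true (c :: rest) = pvScanA true rest from by simp [pvScanA, hc]]
        rw [ih true]
        simp [pvSplit, hc, pvAltAny]
      | false =>
        rw [show pvScanA false (c :: rest)
              = ((c == '<' && rest.head? == some '<') || pvScanA false rest) from by
            simp only [pvScanA, if_neg hc, Bool.not_false, Bool.true_and]
            cases h : (c == '<' && rest.head? == some '<') <;> simp]
        rw [ih false]
        simp only [pvSplit, hc, if_false, Bool.not_false, pvAltAny, Bool.true_and,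
          pvHas2_cons, pvSplit_head_lt]
        cases hcc : (c == '<' && rest.head? == some '<') <;> simp
              
lemma pvEnum_parity (l : List (List Char)) (k : Int) :
    ((PySem.List.enumerate l k).any
        (fun ip => (PySem.Int.mod ip.1 2 == 0) && PySem.Chars.isIn ['<', '<'] ip.2)) =
      pvAltAny (PySem.Int.mod k 2 == 0) l := by
  induction l generalizing k with
  | nil => simp [PySem.List.enumerate, pvAltAny]
  | cons p ps ih =>
    rw [show PySem.List.enumerate (p :: ps) k = (k, p) :: PySem.List.enumerate ps (k + 1) from rfl]
    rw [List.any_cons, ih (k + 1)]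
    have h1 : PySem.Int.mod k 2 = k % 2 := PySem.Int.mod_eq_emod_of_pos (by omega)
    have h2 : PySem.Int.mod (k + 1) 2 = (k + 1) % 2 := PySem.Int.mod_eq_emod_of_pos (by omega)
    have h3 : k % 2 = 0 ∨ k % 2 = 1 := Int.emod_two_eq k
    rcases h3 with h3 | h3
    · have h4 : (k + 1) % 2 = 1 := by omega
      simp [pvAltAny, h3, h4]
    · have h4 : (k + 1) % 2 = 0 := by omega
      simp [pvAltAny, h3, h4]

-- ===== VERDICT (by name: the statement is the Claim_ definition above) =====
theorem has_unevaluated_macro_spec : Claim_equal_has_unevaluated_macro := by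
  intro text _
  unfold Spec_has_unevaluated_macro
  cases text with
  | none => rfl
  | some t =>
    show pvScanA false t.toList = _
    rw [pvScanA_eq t.toList false]
    show _ = (PySem.List.enumerate (PySem.Chars.splitOn t.toList ['`']) 0).any _
    rw [pvSplitOn_eq, pvEnum_parity]
    rfl
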